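-- pv_equiv track=rewrite | github.com/ks-chauhan/Dayworks-Resume-Analyzer | src/core/document_processor.py | _extract_section_by_patterns
-- ===== SOURCE A (Python) =====
-- from typing import List, Dict, Optional
--
-- def _extract_section_by_patterns(content: str, patterns: List[str]) -> str:
--     """Extract text section based on header patterns."""
--     content_lines = content.split('\n')
--     section_content = []
--     in_section = False
--
--     for line in content_lines:
--         line_lower = line.lower().strip()
--
--         # Check if line contains any of the section patterns
--         if any(pattern in line_lower for pattern in patterns):
--             in_section = True
--             continue
--
--         # Check if we've hit another section (common section headers)
--         common_sections = ['summary', 'objective', 'skills', 'experience', 'education',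
--                          'projects', 'certifications', 'awards', 'references']
--         if in_section and any(section in line_lower for section in common_sections):
--             if not any(pattern in line_lower for pattern in patterns):
--                 break
--
--         if in_section and line.strip():
--             section_content.append(line)
--
--     return '\n'.join(section_content).strip()
-- ===== SOURCE B (Python) =====
-- def _extract_section_by_patterns(content, patterns):
--     """Extract text section based on header patterns."""
--     common = ['summary', 'objective', 'skills', 'experience', 'education',
--               'projects', 'certifications', 'awards', 'references']
--
--     def tag(line):
--         ll = line.lower().strip()
--         if any(p in ll for p in patterns):
--             return 'P'  # section-header pattern line
--         if any(s in ll for s in common):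
--             return 'S'  # another section's header: stop marker
--         if line.strip():
--             return 'T'  # text to keep
--         return 'B'      # blank
--
--     tagged = [(tag(l), l) for l in content.split('\n')]
--     start = next((i for i, (t, _) in enumerate(tagged) if t == 'P'), None)
--     if start is None:
--         return ''
--     rest = tagged[start + 1:]
--     stop = next((j for j, (t, _) in enumerate(rest) if t == 'S'), len(rest))
--     return '\n'.join(l for t, l in rest[:stop] if t == 'T').strip()
-- ===== Notes on version B (the rewrite author's own statement) =====
-- stated objective: alternative
-- what changed: Classifies every line once into a tag (pattern/stop/text/blank), then obtains the answer by pure slicing and filtering of the tagged list (index of first pattern tag, slice to the first stop tag, keep text tags), instead of A's in_section-flag state machine with continue/break.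
import Mathlib
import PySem

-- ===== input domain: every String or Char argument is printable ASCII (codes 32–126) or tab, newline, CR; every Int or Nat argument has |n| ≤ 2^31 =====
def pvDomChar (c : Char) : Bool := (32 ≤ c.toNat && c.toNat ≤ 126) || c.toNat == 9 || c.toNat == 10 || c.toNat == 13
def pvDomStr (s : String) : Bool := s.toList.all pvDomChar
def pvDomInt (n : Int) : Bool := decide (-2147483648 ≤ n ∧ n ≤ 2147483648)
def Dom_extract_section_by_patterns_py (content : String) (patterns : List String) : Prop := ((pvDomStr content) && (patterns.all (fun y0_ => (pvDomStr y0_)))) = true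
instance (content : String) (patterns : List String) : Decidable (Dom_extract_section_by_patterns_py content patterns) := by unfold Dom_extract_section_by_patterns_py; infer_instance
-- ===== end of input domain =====

-- B classifies each line once into a tag (pattern/stop/text/blank) and computes the result by slicing and filtering the tagged list, instead of A's in_section state machine (alternative decomposition; same return value).


-- the common_sections literal of A (also used by B), as lists of code points
def pvCommonSections : List (List Char) :=
  ["summary", "objective", "skills", "experience", "education",
   "projects", "certifications", "awards", "references"].map String.toList

-- ===== PORT A =====
-- A's for-loop with break, as structural recursion over the remaining lines carrying the in_section flag
def pvLoopA (pats : List (List Char)) : List (List Char) → Bool → List (List Char)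
  | [], _ => []
  | line :: rest, in_section =>
    let line_lower := PySem.Chars.strip (PySem.Chars.lower line)
    if pats.any (fun pattern => PySem.Chars.isIn pattern line_lower) then
      pvLoopA pats rest true            -- in_section = True; continue
    else if in_section && pvCommonSections.any (fun s => PySem.Chars.isIn s line_lower) then
      if !(pats.any (fun pattern => PySem.Chars.isIn pattern line_lower)) then
        []                              -- break
      else if in_section && !(PySem.Chars.strip line).isEmpty then
        line :: pvLoopA pats rest in_section
      else
        pvLoopA pats rest in_section
    else if in_section && !(PySem.Chars.strip line).isEmpty then
      line :: pvLoopA pats rest in_section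
    else
      pvLoopA pats rest in_section

def extract_section_by_patterns_py (content : String) (patterns : List String) : String :=
  let content_lines := PySem.Chars.splitOn content.toList "\n".toList
  String.ofList (PySem.Chars.strip (PySem.Chars.join "\n".toList
    (pvLoopA (patterns.map String.toList) content_lines false)))

-- ===== PORT B =====
inductive PvTag | P | S | T | B
deriving DecidableEq, Repr

-- B's tag(line)
def pvTag (pats : List (List Char)) (line : List Char) : PvTag :=
  let ll := PySem.Chars.strip (PySem.Chars.lower line)
  if pats.any (fun p => PySem.Chars.isIn p ll) then .P
  else if pvCommonSections.any (fun s => PySem.Chars.isIn s ll) then .S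
  else if !(PySem.Chars.strip line).isEmpty then .T
  else .B

def extract_section_by_patterns_py_alt (content : String) (patterns : List String) : String :=
  let pats := patterns.map String.toList
  let tagged := (PySem.Chars.splitOn content.toList "\n".toList).map
    (fun l => (pvTag pats l, l))
  match tagged.findIdx? (fun x => x.1 == PvTag.P) with
  | none => ""
  | some start =>
    let rest := tagged.drop (start + 1)
    let stop := (rest.findIdx? (fun x => x.1 == PvTag.S)).getD rest.length
    String.ofList (PySem.Chars.strip (PySem.Chars.join "\n".toList
      (((rest.take stop).filter (fun x => x.1 == PvTag.T)).map Prod.snd)))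

-- ===== PRECONDITION & SPEC =====
def Spec_extract_section_by_patterns_py (content : String) (patterns : List String) (out : String) : Prop := out = extract_section_by_patterns_py_alt content patterns
instance (content : String) (patterns : List String) (out : String) : Decidable (Spec_extract_section_by_patterns_py content patterns out) := by unfold Spec_extract_section_by_patterns_py; infer_instance

-- ===== CLAIM (what is proved, stated in full; the proofs are below) =====
def Claim_equal_extract_section_by_patterns_py : Prop := ∀ (content : String) (patterns : List String), Dom_extract_section_by_patterns_py content patterns → Spec_extract_section_by_patterns_py content patterns (extract_section_by_patterns_py content patterns)

-- ===== LEMMAS AND PROOFS =====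

-- B's pipeline on the tagged tail, as a single function of the raw lines
def pvPipe (pats : List (List Char)) (ls : List (List Char)) : List (List Char) :=
  let rest := ls.map (fun l => (pvTag pats l, l))
  let stop := (rest.findIdx? (fun x => x.1 == PvTag.S)).getD rest.length
  ((rest.take stop).filter (fun x => x.1 == PvTag.T)).map Prod.snd

-- A's loop with in_section = true computes B's tag-slice-filter pipeline
theorem pvLoopA_true_eq_pipe (pats : List (List Char)) (ls : List (List Char)) :
    pvLoopA pats ls true = pvPipe pats ls := by
  induction ls with
  | nil => rfl
  | cons line rest ih =>
    simp only [pvLoopA, Bool.true_and, pvPipe, List.map_cons, List.findIdx?_cons] at *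
    by_cases hp : (pats.any fun p => PySem.Chars.isIn p (PySem.Chars.strip (PySem.Chars.lower line))) = true
    · rw [if_pos hp]
      have ht : pvTag pats line = .P := by unfold pvTag; rw [if_pos hp]
      simp only [ht]
      cases h : (rest.map fun l => (pvTag pats l, l)).findIdx? (fun x => x.1 == PvTag.S) with
      | none => simpa [h, List.filter] using ih
      | some j => simpa [h, List.filter] using ih
    · rw [if_neg hp]
      rw [Bool.not_eq_true] at hp
      simp only [hp, Bool.not_false, if_true]
      by_cases hc : (pvCommonSections.any fun s => PySem.Chars.isIn s (PySem.Chars.strip (PySem.Chars.lower line))) = true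
      · rw [if_pos hc]
        have ht : pvTag pats line = .S := by unfold pvTag; rw [if_neg (by simp [hp]), if_pos hc]
        simp [ht]
      · rw [if_neg hc]
        by_cases hs : (!(PySem.Chars.strip line).isEmpty) = true
        · have ht : pvTag pats line = .T := by
            unfold pvTag; rw [if_neg (by simp [hp]), if_neg hc, if_pos hs]
          simp only [hs, if_true, ht]
          cases h : (rest.map fun l => (pvTag pats l, l)).findIdx? (fun x => x.1 == PvTag.S) with
          | none => simpa [h, List.filter] using congrArg (line :: ·) ih
          | some j => simpa [h, List.filter] using congrArg (line :: ·) ih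
        · have ht : pvTag pats line = .B := by
            unfold pvTag; rw [if_neg (by simp [hp]), if_neg hc, if_neg hs]
          simp only [hs, ht]
          cases h : (rest.map fun l => (pvTag pats l, l)).findIdx? (fun x => x.1 == PvTag.S) with
          | none => simpa [h, List.filter] using ih
          | some j => simpa [h, List.filter] using ih

-- from in_section = false, A's loop is: find the first pattern-tagged line, then run the true-loop after it
theorem pvLoopA_false_eq (pats : List (List Char)) (ls : List (List Char)) :
    pvLoopA pats ls false =
      match (ls.map (fun l => (pvTag pats l, l))).findIdx? (fun x => x.1 == PvTag.P) with
      | none => []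
      | some i => pvLoopA pats (ls.drop (i + 1)) true := by
  induction ls with
  | nil => rfl
  | cons line rest ih =>
    by_cases hp : (pats.any fun p => PySem.Chars.isIn p (PySem.Chars.strip (PySem.Chars.lower line))) = true
    · have ht : pvTag pats line = .P := by unfold pvTag; rw [if_pos hp]
      simp only [pvLoopA, hp, if_pos, List.map_cons, List.findIdx?_cons, ht]
      simp
    · have ht : pvTag pats line ≠ .P := by
        unfold pvTag; rw [if_neg hp]; split_ifs <;> simp
      simp only [pvLoopA, hp, Bool.false_and, Bool.false_eq_true, if_false,
        List.map_cons, List.findIdx?_cons]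
      have : ((pvTag pats line, line).1 == PvTag.P) = false := by
        simp [ht]
      rw [ih, this]
      simp only [Bool.false_eq_true, if_false]
      cases h : (rest.map fun l => (pvTag pats l, l)).findIdx? (fun x => x.1 == PvTag.P) with
      | none => simp
      | some i => simp [List.drop_succ_cons]

-- tagged.drop commutes with the map that builds the tags
theorem pvMapDrop (pats : List (List Char)) (ls : List (List Char)) (n : Nat) :
    (ls.map (fun l => (pvTag pats l, l))).drop n = (ls.drop n).map (fun l => (pvTag pats l, l)) :=
  (List.map_drop ..).symm

-- ===== VERDICT (by name: the statement is the Claim_ definition above) =====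
theorem extract_section_by_patterns_py_spec : Claim_equal_extract_section_by_patterns_py := by
  intro content patterns _
  unfold Spec_extract_section_by_patterns_py extract_section_by_patterns_py extract_section_by_patterns_py_alt
  simp only [pvLoopA_false_eq]
  cases h : ((PySem.Chars.splitOn content.toList "\n".toList).map
      (fun l => (pvTag (patterns.map String.toList) l, l))).findIdx? (fun x => x.1 == PvTag.P) with
  | none => rfl
  | some i =>
    simp only [pvLoopA_true_eq_pipe, pvPipe, pvMapDrop]
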